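-- pv_equiv track=rewrite | github.com/pierpaolopalazzo/furieh | python_tools/sraw_to_mp3.py | dedupe_sorted_samples
-- ===== SOURCE A (Python) =====
-- def dedupe_sorted_samples(samples):
--     if not samples:
--         return []
--
--     samples = sorted(samples, key=lambda s: s[0])
--     out = [samples[0]]
--     for s in samples[1:]:
--         if s[0] == out[-1][0]:
--             out[-1] = s
--         else:
--             out.append(s)
--     return out
-- ===== SOURCE B (Python) =====
-- def dedupe_sorted_samples(samples):
--     by_key = {}
--     for s in samples:
--         by_key[s[0]] = s
--     return sorted(by_key.values(), key=lambda s: s[0])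
-- ===== Notes on version B (the rewrite author's own statement) =====
-- stated objective: idiomatic
-- what changed: B builds a last-wins dict keyed by s[0] in one pass and returns its values sorted by key, instead of sorting the whole list and collapsing adjacent equal-key runs with in-place last-element mutation.
import Mathlib
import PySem

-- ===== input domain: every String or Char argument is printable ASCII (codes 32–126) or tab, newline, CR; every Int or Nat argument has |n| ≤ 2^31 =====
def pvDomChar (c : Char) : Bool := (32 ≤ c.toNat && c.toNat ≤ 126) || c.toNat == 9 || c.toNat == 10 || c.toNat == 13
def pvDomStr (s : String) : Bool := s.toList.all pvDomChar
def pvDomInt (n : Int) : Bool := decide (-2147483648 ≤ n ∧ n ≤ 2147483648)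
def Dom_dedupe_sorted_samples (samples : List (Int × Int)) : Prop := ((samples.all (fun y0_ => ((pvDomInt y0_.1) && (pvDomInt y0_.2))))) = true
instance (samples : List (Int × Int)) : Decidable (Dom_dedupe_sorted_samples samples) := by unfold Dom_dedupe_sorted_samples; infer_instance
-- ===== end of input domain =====

-- B replaces A's sort-then-collapse-adjacent-runs with a one-pass last-wins dict keyed by
-- s[0] whose values are then sorted by key; same return value on every input.

-- ===== PORT A =====
-- Python A: sort by key, seed out with the first element, then for each further element
-- overwrite out[-1] on equal key else append.  The loop state 'out' is the Python list
-- kept reversed (head = out[-1]); it is reversed back after the loop.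
def dedupe_sorted_samples (samples : List (Int × Int)) : List (Int × Int) :=
  if samples = [] then []
  else
    match PySem.List.sorted samples (fun s => s.1) false with
    | [] => []
    | s0 :: rest =>
      (rest.foldl (fun out s =>
        match out with
        | last :: prev => if s.1 = last.1 then s :: prev else s :: last :: prev
        | [] => [s]) [s0]).reverse

-- ===== PORT B =====
def dedupe_sorted_samples_alt (samples : List (Int × Int)) : List (Int × Int) :=
  let by_key := samples.foldl (fun d s => d.insert s.1 s) PySem.Dict.empty
  PySem.List.sorted by_key.values (fun s => s.1) false

-- ===== PRECONDITION & SPEC =====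
def Spec_dedupe_sorted_samples (samples : List (Int × Int)) (out : List (Int × Int)) : Prop := out = dedupe_sorted_samples_alt samples
instance (samples : List (Int × Int)) (out : List (Int × Int)) : Decidable (Spec_dedupe_sorted_samples samples out) := by unfold Spec_dedupe_sorted_samples; infer_instance

-- ===== CLAIM (what is proved, stated in full; the proofs are below) =====
def Claim_equal_dedupe_sorted_samples : Prop := ∀ (samples : List (Int × Int)), Dom_dedupe_sorted_samples samples → Spec_dedupe_sorted_samples samples (dedupe_sorted_samples samples)

-- ===== LEMMAS AND PROOFS =====
def pvCollapse : List (Int × Int) → List (Int × Int)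
  | [] => []
  | [a] => [a]
  | a :: b :: t => if b.1 = a.1 then pvCollapse (b :: t) else a :: pvCollapse (b :: t)

theorem pvCollapse_cons2 (a b : Int × Int) (t : List (Int × Int)) :
    pvCollapse (a :: b :: t) = if b.1 = a.1 then pvCollapse (b :: t) else a :: pvCollapse (b :: t) := rfl

theorem pvFoldl_eq_collapse : ∀ (rest : List (Int × Int)) (last : Int × Int) (prevRev : List (Int × Int)),
    (rest.foldl (fun out s =>
      match out with
      | last :: prev => if s.1 = last.1 then s :: prev else s :: last :: prev
      | [] => [s]) (last :: prevRev)).reverse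
      = prevRev.reverse ++ pvCollapse (last :: rest) := by
  intro rest
  induction rest with
  | nil => intro last prevRev; simp [pvCollapse]
  | cons s rest ih =>
    intro last prevRev
    rw [List.foldl_cons]
    show (rest.foldl _ (if s.1 = last.1 then s :: prevRev else s :: last :: prevRev)).reverse = _
    have hc : pvCollapse (last :: s :: rest)
        = if s.1 = last.1 then pvCollapse (s :: rest) else last :: pvCollapse (s :: rest) := rfl
    rw [hc]
    by_cases h : s.1 = last.1
    · rw [if_pos h, if_pos h, ih s prevRev]
    · rw [if_neg h, if_neg h, ih s (last :: prevRev)]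
      simp

theorem pvMem_collapse : ∀ (l : List (Int × Int)) (x : Int × Int), x ∈ pvCollapse l → x ∈ l := by
  intro l
  induction l using pvCollapse.induct with
  | case1 => simp [pvCollapse]
  | case2 a => simp [pvCollapse]
  | case3 a b t h ih =>
    intro x hx
    simp only [pvCollapse, if_pos h] at hx
    exact List.mem_cons_of_mem a (ih x hx)
  | case4 a b t h ih =>
    intro x hx
    simp only [pvCollapse, if_neg h] at hx
    rcases List.mem_cons.1 hx with rfl | hx'
    · exact List.mem_cons_self
    · exact List.mem_cons_of_mem a (ih x hx')

theorem pvCollapse_pairwise : ∀ (l : List (Int × Int)),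
    l.Pairwise (fun a b => a.1 ≤ b.1) → (pvCollapse l).Pairwise (fun a b => a.1 < b.1) := by
  intro l
  induction l using pvCollapse.induct with
  | case1 => intro _; simp [pvCollapse]
  | case2 a => intro _; simp [pvCollapse]
  | case3 a b t h ih =>
    intro hp
    simp only [pvCollapse, if_pos h]
    exact ih (List.pairwise_cons.1 hp).2
  | case4 a b t h ih =>
    intro hp
    rcases List.pairwise_cons.1 hp with ⟨hab, hbt⟩
    simp only [pvCollapse, if_neg h]
    refine List.pairwise_cons.2 ⟨?_, ih hbt⟩
    intro y hy
    have hyin := pvMem_collapse _ y hy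
    have hab' : a.1 < b.1 := lt_of_le_of_ne (hab b List.mem_cons_self) (fun e => h e.symm)
    rcases List.mem_cons.1 hyin with rfl | hyt
    · exact hab'
    · exact lt_of_lt_of_le hab' ((List.pairwise_cons.1 hbt).1 y hyt)

theorem pvFilter_eq_self_of_ne (k : Int) : ∀ (l : List (Int × Int)),
    (∀ x ∈ l, x.1 ≠ k) → l.filter (fun x => x.1 != k) = l := by
  intro l h
  refine List.filter_eq_self.2 ?_
  intro x hx
  simpa using h x hx

theorem pvFilter_cons_pos (k : Int) (a : Int × Int) (l : List (Int × Int)) (h : a.1 ≠ k) :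
    (a :: l).filter (fun x => x.1 != k) = a :: l.filter (fun x => x.1 != k) := by
  simp [h]

theorem pvFilter_cons_neg (k : Int) (a : Int × Int) (l : List (Int × Int)) (h : a.1 = k) :
    (a :: l).filter (fun x => x.1 != k) = l.filter (fun x => x.1 != k) := by
  simp [h]

theorem pvCollapse_insertBy (s : Int × Int) : ∀ (l : List (Int × Int)),
    l.Pairwise (fun a b => a.1 ≤ b.1) →
    (pvCollapse (PySem.List.insertBy (fun a b => decide (a.1 < b.1)) s l)).Perm
      (s :: (pvCollapse l).filter (fun x => x.1 != s.1)) := by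
  intro l
  induction l with
  | nil => intro _; simp [PySem.List.insertBy, pvCollapse]
  | cons a r ih =>
    intro hp
    rcases List.pairwise_cons.1 hp with ⟨har, hr⟩
    by_cases hlt : s.1 < a.1
    · have hbig : ∀ x ∈ pvCollapse (a :: r), x.1 ≠ s.1 := by
        intro x hx
        have hxin := pvMem_collapse _ x hx
        have : a.1 ≤ x.1 := by
          rcases List.mem_cons.1 hxin with rfl | hxr
          · exact le_refl _
          · exact har x hxr
        omega
      have hne : ¬ a.1 = s.1 := by omega
      simp only [PySem.List.insertBy, decide_eq_true_eq, if_pos hlt]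
      have hc : pvCollapse (s :: a :: r) = s :: pvCollapse (a :: r) := by
        cases r <;> rw [pvCollapse_cons2, if_neg hne]
      rw [hc, pvFilter_eq_self_of_ne s.1 _ hbig]
    · simp only [PySem.List.insertBy, decide_eq_true_eq, if_neg hlt]
      cases r with
      | nil =>
        simp only [PySem.List.insertBy]
        by_cases h : s.1 = a.1
        · rw [pvCollapse_cons2, if_pos h]
          have hc : pvCollapse [a] = [a] := rfl
          rw [hc, pvFilter_cons_neg s.1 a [] h.symm, List.filter_nil]
          have : pvCollapse [s] = [s] := rfl
          rw [this]
        · have hc : pvCollapse [a] = [a] := rfl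
          rw [pvCollapse_cons2, if_neg h, hc, pvFilter_cons_pos s.1 a [] (fun e => h e.symm), List.filter_nil]
          have : pvCollapse [s] = [s] := rfl
          rw [this]
          exact List.Perm.swap s a []
      | cons b r' =>
        by_cases hsb : s.1 < b.1
        · have hab : a.1 ≤ b.1 := har b List.mem_cons_self
          have hbne : ¬ b.1 = s.1 := by omega
          have hbig : ∀ x ∈ pvCollapse (b :: r'), x.1 ≠ s.1 := by
            intro x hx
            have hxin := pvMem_collapse _ x hx
            have : b.1 ≤ x.1 := by
              rcases List.mem_cons.1 hxin with rfl | hxr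
              · exact le_refl _
              · exact (List.pairwise_cons.1 hr).1 x hxr
            omega
          simp only [PySem.List.insertBy, decide_eq_true_eq, if_pos hsb]
          by_cases h : s.1 = a.1
          · have hbna : ¬ b.1 = a.1 := by omega
            have hc1 : pvCollapse (a :: s :: b :: r') = pvCollapse (s :: b :: r') := by
              rw [pvCollapse_cons2, if_pos h]
            have hc2 : pvCollapse (s :: b :: r') = s :: pvCollapse (b :: r') := by
              rw [pvCollapse_cons2, if_neg hbne]
            have hc3 : pvCollapse (a :: b :: r') = a :: pvCollapse (b :: r') := by
              rw [pvCollapse_cons2, if_neg hbna]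
            rw [hc1, hc2, hc3, pvFilter_cons_neg s.1 a _ h.symm, pvFilter_eq_self_of_ne s.1 _ hbig]
          · have hbna : ¬ b.1 = a.1 := by
              intro e
              have : a.1 ≤ s.1 := by omega
              omega
            have hc1 : pvCollapse (a :: s :: b :: r') = a :: s :: pvCollapse (b :: r') := by
              rw [pvCollapse_cons2, if_neg h, pvCollapse_cons2, if_neg hbne]
            have hc3 : pvCollapse (a :: b :: r') = a :: pvCollapse (b :: r') := by
              rw [pvCollapse_cons2, if_neg hbna]
            rw [hc1, hc3, pvFilter_cons_pos s.1 a _ (fun e => h e.symm), pvFilter_eq_self_of_ne s.1 _ hbig]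
            exact List.Perm.swap s a _
        · have hab : a.1 ≤ b.1 := har b List.mem_cons_self
          have step : PySem.List.insertBy (fun a b => decide (a.1 < b.1)) s (b :: r')
              = b :: PySem.List.insertBy (fun a b => decide (a.1 < b.1)) s r' := by
            simp [PySem.List.insertBy, hsb]
          have ih' := ih hr
          rw [step] at ih' ⊢
          by_cases hba : b.1 = a.1
          · have hca : pvCollapse (a :: b :: PySem.List.insertBy (fun a b => decide (a.1 < b.1)) s r')
                = pvCollapse (b :: PySem.List.insertBy (fun a b => decide (a.1 < b.1)) s r') := by
              rw [pvCollapse_cons2, if_pos hba]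
            have hcr : pvCollapse (a :: b :: r') = pvCollapse (b :: r') := by
              rw [pvCollapse_cons2, if_pos hba]
            rw [hca, hcr]
            exact ih'
          · have hca : pvCollapse (a :: b :: PySem.List.insertBy (fun a b => decide (a.1 < b.1)) s r')
                = a :: pvCollapse (b :: PySem.List.insertBy (fun a b => decide (a.1 < b.1)) s r') := by
              rw [pvCollapse_cons2, if_neg hba]
            have hcr : pvCollapse (a :: b :: r') = a :: pvCollapse (b :: r') := by
              rw [pvCollapse_cons2, if_neg hba]
            have hane : a.1 ≠ s.1 := by omega
            rw [hca, hcr, pvFilter_cons_pos s.1 a _ hane]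
            exact (ih'.cons a).trans (List.Perm.swap s a _)

def pvDictOf (t : List (Int × Int)) : PySem.Dict Int (Int × Int) :=
  t.foldl (fun d s => d.insert s.1 s) PySem.Dict.empty

theorem pvDictOf_inv : ∀ (t : List (Int × Int)) (d : PySem.Dict Int (Int × Int)),
    (∀ p ∈ d.items, p.2.1 = p.1) → ∀ p ∈ (t.foldl (fun d s => d.insert s.1 s) d).items, p.2.1 = p.1 := by
  intro t
  induction t with
  | nil => intro d h; simpa using h
  | cons s t ih =>
    intro d h
    refine ih _ ?_
    intro p hp
    rcases (PySem.Dict.mem_items_insert _ _ _ _).1 hp with rfl | ⟨hp', _⟩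
    · rfl
    · exact h p hp'

theorem pvMapRepl_perm (k : Int) (v : Int × Int) : ∀ (items : List (Int × (Int × Int))),
    (items.map (·.1)).Nodup → (∀ p ∈ items, p.2.1 = p.1) → k ∈ items.map (·.1) →
    ((items.map (fun p => if p.1 == k then (k, v) else p)).map (·.2)).Perm
      (v :: (items.map (·.2)).filter (fun x => x.1 != k)) := by
  intro items
  induction items with
  | nil => simp
  | cons p rest ih =>
    intro hnd hinv hk
    have hnd' : p.1 ∉ rest.map (·.1) ∧ (rest.map (·.1)).Nodup := by
      simpa using hnd
    by_cases h : p.1 = k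
    · have hrest : ∀ q ∈ rest, q.1 ≠ k := by
        intro q hq e
        exact hnd'.1 (by rw [h, ← e]; exact List.mem_map_of_mem hq)
      have hmapid : rest.map (fun p => if p.1 == k then (k, v) else p) = rest := by
        have hpt : ∀ q ∈ rest, (if q.1 == k then (k, v) else q) = id q := by
          intro q hq
          have hq' : (q.1 == k) = false := by simpa using hrest q hq
          simp [hq']
        rw [List.map_congr_left hpt, List.map_id]
      have hfid : (rest.map (·.2)).filter (fun x => x.1 != k) = rest.map (·.2) := by
        refine pvFilter_eq_self_of_ne k _ ?_
        intro x hx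
        rcases List.mem_map.1 hx with ⟨q, hq, rfl⟩
        rw [hinv q (List.mem_cons_of_mem p hq)]
        exact hrest q hq
      have hpk : p.2.1 = k := by rw [hinv p List.mem_cons_self, h]
      simp only [List.map_cons]
      rw [if_pos (by simpa using h), hmapid, pvFilter_cons_neg k p.2 _ hpk, hfid]
    · have hk' : k ∈ rest.map (·.1) := by
        rcases List.mem_map.1 hk with ⟨q, hq, rfl⟩
        rcases List.mem_cons.1 hq with rfl | hq'
        · exact absurd rfl h
        · exact List.mem_map_of_mem hq'
      have ih' := ih hnd'.2 (fun q hq => hinv q (List.mem_cons_of_mem p hq)) hk'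
      have hpk : p.2.1 ≠ k := by rw [hinv p List.mem_cons_self]; exact h
      simp only [List.map_cons]
      rw [if_neg (by simpa using h), pvFilter_cons_pos k p.2 _ hpk]
      exact (ih'.cons p.2).trans (List.Perm.swap v p.2 _)

theorem pvValues_insert_perm (d : PySem.Dict Int (Int × Int)) (s : Int × Int)
    (hnd : d.keys.Nodup) (hinv : ∀ p ∈ d.items, p.2.1 = p.1) :
    ((d.insert s.1 s).values).Perm (s :: d.values.filter (fun x => x.1 != s.1)) := by
  by_cases h : d.contains s.1 = true
  · have hk : s.1 ∈ d.items.map (·.1) := by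
      have := (PySem.Dict.contains_iff_mem_keys _ _).1 h
      simpa [PySem.Dict.keys] using this
    have := pvMapRepl_perm s.1 s d.items (by simpa [PySem.Dict.keys] using hnd) hinv hk
    simpa [PySem.Dict.values, PySem.Dict.items_insert, h] using this
  · have hnone : ∀ p ∈ d.items, p.1 ≠ s.1 := by
      intro p hp e
      exact h ((PySem.Dict.contains_iff_mem_keys _ _).2
        (e ▸ PySem.Dict.mem_keys_of_mem_items (d := d) hp))
    have hfid : d.values.filter (fun x => x.1 != s.1) = d.values := by
      refine pvFilter_eq_self_of_ne s.1 _ ?_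
      intro x hx
      rcases List.mem_map.1 (show x ∈ d.items.map (fun p => p.2) from hx) with ⟨q, hq, rfl⟩
      rw [hinv q hq]; exact hnone q hq
    rw [hfid]
    have hins : (d.insert s.1 s).values = d.values ++ [s] := by
      simp [PySem.Dict.values, PySem.Dict.items_insert, h]
    rw [hins]
    exact List.perm_append_singleton s d.values

theorem pvMain_perm : ∀ (t : List (Int × Int)),
    (pvCollapse (PySem.List.sorted t (fun s => s.1) false)).Perm (pvDictOf t).values := by
  intro t
  induction t using List.reverseRecOn with
  | nil => simp [pvDictOf, pvCollapse, PySem.Dict.empty, PySem.Dict.values, PySem.List.sorted]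
  | append_singleton t s ih =>
    have hsorted : PySem.List.sorted (t ++ [s]) (fun s => s.1) false
        = PySem.List.insertBy (fun a b => decide (a.1 < b.1)) s (PySem.List.sorted t (fun s => s.1) false) := by
      rw [PySem.List.sorted_eq_foldl_insertBy, PySem.List.sorted_eq_foldl_insertBy]
      simp [List.foldl_append]
    have hdict : pvDictOf (t ++ [s]) = (pvDictOf t).insert s.1 s := by
      simp [pvDictOf, List.foldl_append]
    have hnd : (pvDictOf t).keys.Nodup :=
      PySem.Dict.nodup_keys_foldl_insert_key t (fun s => s.1) (fun _ s => s) PySem.Dict.empty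
        PySem.Dict.nodup_keys_empty
    have hinv : ∀ p ∈ (pvDictOf t).items, p.2.1 = p.1 :=
      pvDictOf_inv t PySem.Dict.empty (by simp [PySem.Dict.empty])
    rw [hsorted, hdict]
    exact ((pvCollapse_insertBy s _ (PySem.List.sorted_pairwise t (fun s => s.1))).trans
      ((ih.filter _).cons s)).trans (pvValues_insert_perm (pvDictOf t) s hnd hinv).symm

-- ===== VERDICT (by name: the statement is the Claim_ definition above) =====
theorem dedupe_sorted_samples_spec : Claim_equal_dedupe_sorted_samples := by
  intro samples _
  unfold Spec_dedupe_sorted_samples dedupe_sorted_samples dedupe_sorted_samples_alt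
  by_cases hs : samples = []
  · subst hs
    simp [PySem.Dict.empty, PySem.Dict.values, PySem.List.sorted]
  · rw [if_neg hs]
    have hne : PySem.List.sorted samples (fun s => s.1) false ≠ [] := by
      intro h; exact hs ((PySem.List.sorted_eq_nil_iff _ _ _).1 h)
    rcases h : PySem.List.sorted samples (fun s => s.1) false with _ | ⟨s0, rest⟩
    · exact absurd h hne
    · have hA := pvFoldl_eq_collapse rest s0 []
      simp only [List.reverse_nil, List.nil_append] at hA
      dsimp only
      rw [hA]
      have hperm : (pvCollapse (s0 :: rest)).Perm (pvDictOf samples).values := by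
        have := pvMain_perm samples
        rwa [h] at this
      have hpw : (pvCollapse (s0 :: rest)).Pairwise (fun a b => a.1 < b.1) := by
        have := pvCollapse_pairwise (PySem.List.sorted samples (fun s => s.1) false)
          (PySem.List.sorted_pairwise samples (fun s => s.1))
        rwa [h] at this
      exact (PySem.List.sorted_eq_of_perm_of_pairwise_lt _ _ (fun s => s.1) hperm hpw).symm
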